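-- pv_equiv track=rewrite | github.com/yinyajun/Details-In-Recommendation | model/DeepWalk/preprocess.py | session_segmentation
-- ===== SOURCE A (Python) =====
-- def session_segmentation(data, session_duration):
--     # data: [(t1, item), (t2, item), (t3, item)]
--     tmp = []
--     session_id = 0
--     for i in range(len(data)):
--         if i > 0:
--             difference = data[i][0] - data[i - 1][0]
--             if difference > session_duration:  # 根据时间差来划分session
--                 session_id += 1
--             elif data[i][1] == data[i - 1][1]:  # 如果同一个session内连续交互同一个item，视为一次
--                 continue
--         tmp.append((session_id, data[i][1]))
--     return tmp
-- ===== SOURCE B (Python) =====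
-- def session_segmentation(data, session_duration):
--     # Two-pass reformulation: build a prefix-sum session-id table from the
--     # boundary gaps, then filter/emit in a second zip-driven pass.
--     if not data:
--         return []
--     gaps = [b[0] - a[0] > session_duration for a, b in zip(data, data[1:])]
--     sids = [0]
--     cur = 0
--     for g in gaps:
--         cur += 1 if g else 0
--         sids.append(cur)
--     out = [(0, data[0][1])]
--     for (a, b), (g, s) in zip(zip(data, data[1:]), zip(gaps, sids[1:])):
--         if g or b[1] != a[1]:
--             out.append((s, b[1]))
--     return out
-- ===== Notes on version B (the rewrite author's own statement) =====
-- stated objective: alternative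
-- what changed: Replaced the interleaved single index loop carrying a mutable session counter with two separate zip-driven passes: first a prefix-sum table of session ids built from the boundary gaps, then a filtering pass that emits (session_id, item) at session starts and item changes.
import Mathlib
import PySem

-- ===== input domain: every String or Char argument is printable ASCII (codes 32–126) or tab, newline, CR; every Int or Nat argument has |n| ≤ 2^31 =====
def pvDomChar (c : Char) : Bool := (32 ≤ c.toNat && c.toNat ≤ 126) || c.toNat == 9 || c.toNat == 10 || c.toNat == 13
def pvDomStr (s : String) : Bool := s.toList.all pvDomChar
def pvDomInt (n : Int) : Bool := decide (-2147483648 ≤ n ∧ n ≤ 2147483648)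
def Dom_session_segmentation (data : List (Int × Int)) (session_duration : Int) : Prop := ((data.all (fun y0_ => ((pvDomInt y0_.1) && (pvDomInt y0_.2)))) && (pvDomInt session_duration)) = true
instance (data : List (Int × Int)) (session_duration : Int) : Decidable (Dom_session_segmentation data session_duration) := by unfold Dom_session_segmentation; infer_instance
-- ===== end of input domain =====

-- B replaces A's single interleaved loop by a prefix-sum session-id table plus a
-- separate zip-driven filtering pass (alternative decomposition, same O(n) cost).

-- ===== PORT A =====
-- A's loop, with data[i-1] carried as `prev` (none at i = 0), state (tmp, session_id) as in A.
def segA : List (Int × Int) → Int → Option (Int × Int) → Int → List (Int × Int) → List (Int × Int)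
  | [], _, _, _, tmp => tmp
  | (t, it) :: rest, sd, prev, sid, tmp =>
    match prev with
    | none => segA rest sd (some (t, it)) sid (tmp ++ [(sid, it)])
    | some (pt, pit) =>
      if t - pt > sd then segA rest sd (some (t, it)) (sid + 1) (tmp ++ [(sid + 1, it)])
      else if it == pit then segA rest sd (some (t, it)) sid tmp
      else segA rest sd (some (t, it)) sid (tmp ++ [(sid, it)])

def session_segmentation (data : List (Int × Int)) (session_duration : Int) : List (Int × Int) :=
  segA data session_duration none 0 []

-- ===== PORT B =====
def session_segmentation_alt (data : List (Int × Int)) (session_duration : Int) : List (Int × Int) :=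
  match data with
  | [] => []
  | first :: _ =>
    let gaps : List Bool :=
      (data.zip data.tail).map (fun p => decide (p.2.1 - p.1.1 > session_duration))
    let sids : List Int :=
      (gaps.foldl
        (fun st g => (st.1 ++ [st.2 + (if g then 1 else 0)], st.2 + (if g then 1 else 0)))
        ([(0 : Int)], (0 : Int))).1
    ((data.zip data.tail).zip (gaps.zip sids.tail)).foldl
      (fun out x => if x.2.1 || x.1.2.2 != x.1.1.2 then out ++ [(x.2.2, x.1.2.2)] else out)
      [((0 : Int), first.2)]

-- ===== PRECONDITION & SPEC =====
def Spec_session_segmentation (data : List (Int × Int)) (session_duration : Int) (out : List (Int × Int)) : Prop := out = session_segmentation_alt data session_duration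
instance (data : List (Int × Int)) (session_duration : Int) (out : List (Int × Int)) : Decidable (Spec_session_segmentation data session_duration out) := by unfold Spec_session_segmentation; infer_instance

-- ===== CLAIM (what is proved, stated in full; the proofs are below) =====
def Claim_equal_session_segmentation : Prop := ∀ (data : List (Int × Int)) (session_duration : Int), Dom_session_segmentation data session_duration → Spec_session_segmentation data session_duration (session_segmentation data session_duration)

-- ===== LEMMAS AND PROOFS =====

-- reference recursion: the segmentation of `rest` given previous element `prev` and current id `sid`
def seg (sd : Int) : Int → (Int × Int) → List (Int × Int) → List (Int × Int)
  | _, _, [] => []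
  | sid, prev, (t, it) :: rest =>
    if t - prev.1 > sd then (sid + 1, it) :: seg sd (sid + 1) (t, it) rest
    else if it = prev.2 then seg sd sid (t, it) rest
    else (sid, it) :: seg sd sid (t, it) rest

def gapsOf (sd : Int) : (Int × Int) → List (Int × Int) → List Bool
  | _, [] => []
  | prev, q :: rest => decide (q.1 - prev.1 > sd) :: gapsOf sd q rest

def sidsOf : Int → List Bool → List Int
  | _, [] => []
  | c, g :: gs => (c + if g then 1 else 0) :: sidsOf (c + if g then 1 else 0) gs

theorem segA_eq (sd : Int) (rest : List (Int × Int)) :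
    ∀ (prev : Int × Int) (sid : Int) (tmp : List (Int × Int)),
      segA rest sd (some prev) sid tmp = tmp ++ seg sd sid prev rest := by
  induction rest with
  | nil => intro prev sid tmp; simp [segA, seg]
  | cons q rest ih =>
    intro prev sid tmp
    obtain ⟨t, it⟩ := q
    by_cases h1 : t - prev.1 > sd
    · simp [segA, seg, h1, ih]
    · by_cases h2 : it = prev.2
      · simp [segA, seg, h1, h2, ih]
      · simp [segA, seg, h1, h2, ih]

theorem gaps_eq (sd : Int) (rest : List (Int × Int)) :
    ∀ (prev : Int × Int),
      ((prev :: rest).zip rest).map (fun p => decide (p.2.1 - p.1.1 > sd)) = gapsOf sd prev rest := by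
  induction rest with
  | nil => intro prev; simp [gapsOf]
  | cons q rest ih =>
    intro prev
    rw [List.zip_cons_cons, List.map_cons, ih q]
    simp [gapsOf]

theorem sids_fold (gs : List Bool) :
    ∀ (acc : List Int) (c : Int),
      (gs.foldl (fun st g => (st.1 ++ [st.2 + (if g then 1 else 0)], st.2 + (if g then 1 else 0)))
        (acc, c)).1 = acc ++ sidsOf c gs := by
  induction gs with
  | nil => intro acc c; simp [sidsOf]
  | cons g gs ih => intro acc c; simp [sidsOf, ih]

theorem out_fold (sd : Int) (rest : List (Int × Int)) :
    ∀ (prev : Int × Int) (sid : Int) (acc : List (Int × Int)),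
      (((prev :: rest).zip rest).zip ((gapsOf sd prev rest).zip (sidsOf sid (gapsOf sd prev rest)))).foldl
        (fun out x => if x.2.1 || x.1.2.2 != x.1.1.2 then out ++ [(x.2.2, x.1.2.2)] else out) acc
      = acc ++ seg sd sid prev rest := by
  induction rest with
  | nil => intro prev sid acc; simp [gapsOf, sidsOf, seg]
  | cons q rest ih =>
    intro prev sid acc
    obtain ⟨t, it⟩ := q
    simp only [gapsOf, sidsOf, List.zip_cons_cons, List.foldl_cons]
    by_cases h1 : t - prev.1 > sd
    · simp only [decide_eq_true h1, Bool.true_or, if_true]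
      rw [ih]
      simp only [seg, if_pos h1]
      simp
    · simp only [decide_eq_false h1, Bool.false_or, Bool.false_eq_true, if_false]
      by_cases h2 : it = prev.2
      · rw [if_neg (by simp [h2]), ih]
        simp only [seg, if_neg h1, if_pos h2, add_zero]
      · rw [if_pos (by simp [bne, h2]), ih]
        simp only [seg, if_neg h1, if_neg h2]
        simp

-- ===== VERDICT (by name: the statement is the Claim_ definition above) =====
theorem session_segmentation_spec : Claim_equal_session_segmentation := by
  intro data sd _
  unfold Spec_session_segmentation session_segmentation session_segmentation_alt
  cases data with
  | nil => simp [segA]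
  | cons p rest =>
    obtain ⟨t, it⟩ := p
    simp only [List.tail_cons]
    rw [gaps_eq sd rest (t, it), sids_fold]
    simp only [List.singleton_append, List.tail_cons]
    rw [out_fold sd rest (t, it) 0]
    simp [segA, segA_eq]
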